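-- pv_equiv track=rewrite | github.com/pjot/advent-of-code | 2020/19/19.py | parse
-- ===== SOURCE A (Python) =====
-- def parse(lines):
--     rules = {}
--     horizon = set()
--     inputs = []
--     parsing_rules = True
--     for line in lines:
--         if line.strip() == '':
--             parsing_rules = False
--             continue
--
--         if not parsing_rules:
--             inputs.append(line.strip())
--             continue
--
--         i, rule = line.strip().split(': ')
--         if '"' in rule:
--             rule = rule[1]
--             horizon.add(i)
--
--         rules[i] = rule
--     return rules, inputs, horizon
-- ===== SOURCE B (Python) =====
-- def parse(lines):
--     strips = [line.strip() for line in lines]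
--     sep = strips.index('') if '' in strips else len(strips)
--     pairs = [s.split(': ') for s in strips[:sep]]
--     rules = {i: (r[1] if '"' in r else r) for i, r in pairs}
--     horizon = {i for i, r in pairs if '"' in r}
--     inputs = [s for s in strips[sep + 1:] if s]
--     return rules, inputs, horizon
-- ===== Notes on version B (the rewrite author's own statement) =====
-- stated objective: simpler
-- what changed: B replaces A's single flag-driven loop by an index-based partition: strip every line once, locate the first blank line with list.index, then build rules/horizon/inputs from the two slices with comprehensions.
import Mathlib
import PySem

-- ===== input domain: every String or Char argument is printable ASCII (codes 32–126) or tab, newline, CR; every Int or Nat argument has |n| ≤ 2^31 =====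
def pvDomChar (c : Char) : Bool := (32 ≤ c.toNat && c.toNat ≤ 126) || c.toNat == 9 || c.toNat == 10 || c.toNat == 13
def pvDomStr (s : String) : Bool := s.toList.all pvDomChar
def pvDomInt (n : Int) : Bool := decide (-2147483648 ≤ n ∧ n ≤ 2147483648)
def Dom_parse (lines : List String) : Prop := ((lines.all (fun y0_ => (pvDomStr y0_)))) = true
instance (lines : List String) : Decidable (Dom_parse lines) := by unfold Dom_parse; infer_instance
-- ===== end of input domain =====

-- B replaces A's flag-driven single loop by an index-based partition at the first blank line,
-- with the rules/horizon/inputs built from the two slices (objective: simpler).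

-- ===== PORT A =====
-- state: (rules, inputs, horizon, parsing_rules)
def parseStateA := PySem.Dict String String × List String × PySem.Set String × Bool

def parseStepA (st : parseStateA) (line : String) : parseStateA :=
  let (rules, inputs, horizon, parsingRules) := st
  if PySem.Str.strip line == "" then
    (rules, inputs, horizon, false)
  else if !parsingRules then
    (rules, inputs ++ [PySem.Str.strip line], horizon, parsingRules)
  else
    -- i, rule = line.strip().split(': ')  — raises unless exactly 2 parts (excluded by Pre_)
    match PySem.Str.split? (PySem.Str.strip line) ": " with
    | some [i, rule] =>
        if PySem.Str.isIn "\"" rule then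
          -- rule = rule[1]; horizon.add(i)  — rule[1] raises if len < 2 (excluded by Pre_)
          match PySem.Str.pyGet? rule 1 with
          | some c => (rules.insert i (String.ofList [c]), inputs, PySem.Set.add horizon i, parsingRules)
          | none => st
        else (rules.insert i rule, inputs, horizon, parsingRules)
    | _ => st

def parse (lines : List String) : (List (String × String)) × List String × List String :=
  let st := lines.foldl parseStepA (PySem.Dict.empty, [], PySem.Set.empty, true)
  (st.1.items, st.2.1, st.2.2.1)

-- ===== PORT B =====
-- i, r = p (exactly-2 unpack; other lengths raise in B's comprehension, excluded by Pre_)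
def parseUnpack2 (p : List String) : String × String :=
  match p with
  | [i, r] => (i, r)
  | _ => ("", "")

-- r[1] if '"' in r else r
def parseRuleVal (r : String) : String :=
  if PySem.Str.isIn "\"" r then ((PySem.Str.pyGet? r 1).map (fun c => String.ofList [c])).getD "" else r

def parse_alt (lines : List String) : (List (String × String)) × List String × List String :=
  let strips := lines.map PySem.Str.strip
  let sep := (PySem.List.index? strips "").getD strips.length
  let pairs := (strips.take sep).map (fun s => parseUnpack2 ((PySem.Str.split? s ": ").getD []))
  let rules := pairs.foldl (fun d p => d.insert p.1 (parseRuleVal p.2)) PySem.Dict.empty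
  let horizon := PySem.Set.ofList ((pairs.filter (fun p => PySem.Str.isIn "\"" p.2)).map (·.1))
  let inputs := (strips.drop (sep + 1)).filter (fun s => !(s == ""))
  (rules.items, inputs, horizon)

-- ===== PRECONDITION & SPEC =====
-- a rule line must strip-split on ': ' into exactly 2 parts, and a quoted rule needs len ≥ 2
def parseOkRule (l : String) : Bool :=
  match PySem.Str.split? (PySem.Str.strip l) ": " with
  | some [_, r] => !(PySem.Str.isIn "\"" r) || decide (2 ≤ r.toList.length)
  | _ => false

-- Pre_ excludes exactly the inputs on which A raises: a line before the first blank line whose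
-- strip does not split on ': ' into exactly 2 parts (ValueError) or whose quoted rule part has
-- length < 2 (IndexError on rule[1]).
def Pre_parse (lines : List String) : Prop :=
  ((lines.takeWhile (fun l => !(PySem.Str.strip l == ""))).all parseOkRule) = true

instance (lines : List String) : Decidable (Pre_parse lines) := by unfold Pre_parse; infer_instance

def pvWitness_parse : List String := ["0: 1 2", "1: \"a\"", "", "ab", "", " cd "]

def Spec_parse (lines : List String) (out : (List (String × String)) × List String × List String) : Prop := out = parse_alt lines
instance (lines : List String) (out : (List (String × String)) × List String × List String) : Decidable (Spec_parse lines out) := by unfold Spec_parse; infer_instance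

-- ===== CLAIM (what is proved, stated in full; the proofs are below) =====
def Claim_equal_parse : Prop := ∀ (lines : List String), Dom_parse lines → Pre_parse lines → Spec_parse lines (parse lines)

-- ===== LEMMAS AND PROOFS =====

-- once the flag is false, the loop only appends stripped non-blank lines to inputs
theorem parse_falseLoop (ls : List String) (d : PySem.Dict String String)
    (ins h : List String) :
    ls.foldl parseStepA (d, ins, h, false)
      = (d, ins ++ (ls.map PySem.Str.strip).filter (fun s => !(s == "")), h, false) := by
  induction ls generalizing ins with
  | nil => simp
  | cons l rest ih =>
    simp only [List.foldl_cons, List.map_cons, List.filter_cons]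
    by_cases hb : PySem.Str.strip l == ""
    · simp [parseStepA, hb, ih]
    · simp only [hb, Bool.not_false, parseStepA]
      rw [if_neg (by simpa using hb)]
      simp [ih, List.append_assoc]

-- the true-flag loop equals B's partition-based computation (state generalized)
theorem parse_mainLoop (ls : List String) (d : PySem.Dict String String)
    (ins h : List String)
    (hpre : ((ls.takeWhile (fun l => !(PySem.Str.strip l == ""))).all parseOkRule) = true) :
    ls.foldl parseStepA (d, ins, h, true)
      = (let strips := ls.map PySem.Str.strip
         let sep := (PySem.List.index? strips "").getD strips.length
         let pairs := (strips.take sep).map (fun s => parseUnpack2 ((PySem.Str.split? s ": ").getD []))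
         (pairs.foldl (fun d p => d.insert p.1 (parseRuleVal p.2)) d,
          ins ++ (strips.drop (sep + 1)).filter (fun s => !(s == "")),
          ((pairs.filter (fun p => PySem.Str.isIn "\"" p.2)).map (·.1)).foldl PySem.Set.add h,
          (PySem.List.index? strips "").isNone)) := by
  induction ls generalizing d h with
  | nil => simp
  | cons l rest ih =>
    by_cases hb : PySem.Str.strip l == ""
    · -- blank line: sep = 0, the rest goes to the inputs side
      have hsep : PySem.List.index? (PySem.Str.strip l :: rest.map PySem.Str.strip) "" = some 0 := by
        rw [show PySem.Str.strip l = "" from by simpa using hb]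
        exact PySem.List.index?_cons_self _ _
      have hstep : parseStepA (d, ins, h, true) l = (d, ins, h, false) := by
        simp [parseStepA, hb]
      rw [PySem.List.index?_eq_idxOf?] at hsep
      simp only [List.foldl_cons, hstep, parse_falseLoop, List.map_cons]
      simp [hsep]
    · -- rule line
      have hne : PySem.Str.strip l ≠ "" := by simpa using hb
      have hok : parseOkRule l = true ∧
          ((rest.takeWhile (fun l => !(PySem.Str.strip l == ""))).all parseOkRule) = true := by
        rw [List.takeWhile_cons, if_pos (by simpa using hb)] at hpre
        simpa using hpre
      obtain ⟨h1, h2⟩ := hok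
      obtain ⟨i, r, hsp⟩ : ∃ i r, PySem.Str.split? (PySem.Str.strip l) ": " = some [i, r] := by
        unfold parseOkRule at h1
        rcases hx : PySem.Str.split? (PySem.Str.strip l) ": " with _ | parts
        · rw [hx] at h1; exact absurd h1 (by simp)
        · rcases parts with _ | ⟨i, _ | ⟨r, _ | _⟩⟩ <;> rw [hx] at h1
          · exact absurd h1 (by simp)
          · exact absurd h1 (by simp)
          · exact ⟨i, r, rfl⟩
          · exact absurd h1 (by simp)
      have hlen : PySem.Chars.isIn ['\"'] r.toList = true → 2 ≤ r.toList.length := by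
        intro hq
        unfold parseOkRule at h1; rw [hsp] at h1
        simp only [PySem.Str.isIn_eq] at h1
        simpa [hq] using h1
      have hup : parseUnpack2 ((PySem.Str.split? (PySem.Str.strip l) ": ").getD []) = (i, r) := by
        rw [hsp]; rfl
      have hval : parseStepA (d, ins, h, true) l
          = (d.insert i (parseRuleVal r), ins,
             (if PySem.Chars.isIn ['\"'] r.toList then PySem.Set.add h i else h), true) := by
        by_cases hq : PySem.Chars.isIn ['\"'] r.toList = true
        · obtain ⟨c, hc'⟩ : ∃ c, r.toList[(1 : Nat)]? = some c := by
            have hl2 := hlen hq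
            rcases ho : r.toList[(1 : Nat)]? with _ | c
            · rw [List.getElem?_eq_none_iff] at ho; omega
            · exact ⟨c, rfl⟩
          have hrl : 1 < r.length := Nat.lt_of_succ_le (hlen hq)
          have hc : PySem.List.pyGet? r.toList 1 = some c := by
            simp only [PySem.List.pyGet?, PySem.List.pyIdx?]
            norm_num [hrl]
            obtain ⟨_, he⟩ := List.getElem?_eq_some_iff.mp hc'
            exact he
          simp [parseStepA, hb, hsp, hq, parseRuleVal, hc]
        · simp [parseStepA, hb, hsp, hq, parseRuleVal]
      have hidx : PySem.List.index? (PySem.Str.strip l :: rest.map PySem.Str.strip) ""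
          = (PySem.List.index? (rest.map PySem.Str.strip) "").map (· + 1) :=
        PySem.List.index?_cons_of_ne _ hne
      simp only [List.foldl_cons, hval]
      rw [ih (d.insert i (parseRuleVal r))
            (if PySem.Chars.isIn ['\"'] r.toList then PySem.Set.add h i else h) h2]
      rw [PySem.List.index?_eq_idxOf?] at hidx
      rcases hio : PySem.List.index? (rest.map PySem.Str.strip) "" with _ | k <;>
        rw [PySem.List.index?_eq_idxOf?] at hio <;>
        by_cases hq : PySem.Chars.isIn ['\"'] r.toList = true <;>
          simp [hio, hq, hup, hidx, List.take_succ_cons]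

-- ===== VERDICT (by name: the statement is the Claim_ definition above) =====
theorem parse_spec : Claim_equal_parse := by
  intro lines _ hpre
  unfold Spec_parse parse parse_alt
  rw [parse_mainLoop lines _ _ _ hpre]
  simp [PySem.Set.ofList_eq_foldl, PySem.Set.empty]
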